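-- pv_equiv track=rewrite | github.com/javierlopeza/goodreads-scraper | shelves_merger.py | fix_genre
-- ===== SOURCE A (Python) =====
-- def fix_genre(genre):
--     fixes = [
--         ("Hi...", "History"),
--         ("Lite...", "Literature"),
--         ("International Rel...", "International Relations"),
--         ("Science Fiction R...", "Science Fiction Romance"),
--         ("Complementary Med...", "Complementary Medicine")
--     ]
--     for (old, new) in fixes:
--         genre = genre.replace(old, new)
--     return genre
-- ===== SOURCE B (Python) =====
-- FIXES = {
--     "Hi...": "History",
--     "Lite...": "Literature",
--     "International Rel...": "International Relations",
--     "Science Fiction R...": "Science Fiction Romance",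
--     "Complementary Med...": "Complementary Medicine",
-- }
--
--
-- def fix_genre(genre):
--     # single left-to-right pass: at each position emit the replacement of the
--     # first truncated form that starts here, or copy one character
--     out = []
--     i = 0
--     n = len(genre)
--     while i < n:
--         for old, new in FIXES.items():
--             if genre.startswith(old, i):
--                 out.append(new)
--                 i += len(old)
--                 break
--         else:
--             out.append(genre[i])
--             i += 1
--     return "".join(out)
-- ===== Notes on version B (the rewrite author's own statement) =====
-- stated objective: alternative
-- what changed: Replaces the five sequential full-string str.replace passes with one left-to-right scan that, at each position, emits the replacement of the first truncated form starting there or copies the character, using the fact that the patterns never overlap and the replacements never create new matches.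
import Mathlib
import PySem

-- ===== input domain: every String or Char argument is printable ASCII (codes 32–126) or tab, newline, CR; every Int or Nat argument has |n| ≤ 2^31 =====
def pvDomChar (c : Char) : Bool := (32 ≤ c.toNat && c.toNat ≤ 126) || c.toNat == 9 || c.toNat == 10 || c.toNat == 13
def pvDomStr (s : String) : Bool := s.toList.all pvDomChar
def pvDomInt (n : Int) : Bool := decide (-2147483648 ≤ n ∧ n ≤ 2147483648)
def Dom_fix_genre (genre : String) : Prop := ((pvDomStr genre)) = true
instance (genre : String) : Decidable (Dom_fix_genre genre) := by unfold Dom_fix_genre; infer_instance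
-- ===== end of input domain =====

set_option maxRecDepth 100000


-- B replaces A's five sequential full-string replace passes by one left-to-right
-- scan dispatching on the first matching truncated form (objective: alternative).

-- ===== PORT A =====
def fix_genre (genre : String) : String :=
  let fixes : List (String × String) :=
    [("Hi...", "History"),
     ("Lite...", "Literature"),
     ("International Rel...", "International Relations"),
     ("Science Fiction R...", "Science Fiction Romance"),
     ("Complementary Med...", "Complementary Medicine")]
  fixes.foldl (fun g p => PySem.Str.replace g p.1 p.2) genre

-- ===== PORT B =====
-- FIXES dict (insertion order) as an association list, port of Source B's module constant
def pvFixes : List (List Char × List Char) :=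
  [("Hi...".toList, "History".toList),
   ("Lite...".toList, "Literature".toList),
   ("International Rel...".toList, "International Relations".toList),
   ("Science Fiction R...".toList, "Science Fiction Romance".toList),
   ("Complementary Med...".toList, "Complementary Medicine".toList)]

-- the while-loop of Source B: at each position, the inner for-loop finds the first
-- (old, new) with genre.startswith(old, i) (= List.find?); on a match emit new and
-- advance by len(old), otherwise copy one character
def pvScan : List Char → List Char
  | [] => []
  | c :: t =>
    match h : pvFixes.find? (fun p => p.1.isPrefixOf (c :: t)) with
    | some (old, _new) => _new ++ pvScan (List.drop old.length (c :: t))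
    | none => c :: pvScan t
termination_by s => s.length
decreasing_by
  · have hmem := List.mem_of_find?_eq_some h
    have hlen : 0 < old.length := by
      simp [pvFixes] at hmem
      rcases hmem with ⟨h1, _⟩ | ⟨h1, _⟩ | ⟨h1, _⟩ | ⟨h1, _⟩ | ⟨h1, _⟩ <;> subst h1 <;> decide
    simp; omega
  · simp

def fix_genre_alt (genre : String) : String := String.ofList (pvScan genre.toList)

-- ===== PRECONDITION & SPEC =====
def Spec_fix_genre (genre : String) (out : String) : Prop := out = fix_genre_alt genre
instance (genre : String) (out : String) : Decidable (Spec_fix_genre genre out) := by unfold Spec_fix_genre; infer_instance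

-- ===== CLAIM (what is proved, stated in full; the proofs are below) =====
def Claim_equal_fix_genre : Prop := ∀ (genre : String), Dom_fix_genre genre → Spec_fix_genre genre (fix_genre genre)

-- ===== LEMMAS AND PROOFS =====

-- go with enough fuel = accumulator-reversed prefix ++ replace of the rest
theorem pvGo_spec (old new : List Char) (ho : old ≠ []) :
    ∀ (fuel : Nat) (l acc : List Char), l.length ≤ fuel →
      PySem.Chars.replace.go old new fuel l acc = acc.reverse ++ PySem.Chars.replace l old new := by
  intro fuel
  induction fuel using Nat.strong_induction_on with
  | _ fuel ih =>
    intro l acc hl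
    cases fuel with
    | zero =>
      have : l = [] := List.eq_nil_of_length_eq_zero (Nat.le_zero.mp hl)
      subst this
      simp [PySem.Chars.replace, PySem.Chars.replace.go, List.isEmpty_iff, ho]
    | succ fuel =>
      cases l with
      | nil => simp [PySem.Chars.replace, PySem.Chars.replace.go, List.isEmpty_iff, ho]
      | cons c t =>
        have hrepl : PySem.Chars.replace (c :: t) old new
            = PySem.Chars.replace.go old new (t.length + 1) (c :: t) [] := by
          simp [PySem.Chars.replace, List.isEmpty_iff, ho]
        have hol : 0 < old.length := by
          cases old with
          | nil => exact absurd rfl ho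
          | cons a b => simp
        have htf : t.length ≤ fuel := by simpa using hl
        rw [PySem.Chars.replace.go]
        by_cases hpre : old.isPrefixOf (c :: t) = true
        · have hdl : (List.drop old.length (c :: t)).length ≤ t.length := by
            simp; omega
          rw [if_pos hpre,
            ih fuel (Nat.lt_succ_self _) _ _ (le_trans hdl htf),
            hrepl, PySem.Chars.replace.go, if_pos hpre,
            ih t.length (Nat.lt_succ_of_le htf) _ _ hdl]
          simp
        · rw [if_neg hpre, ih fuel (Nat.lt_succ_self _) _ _ htf,
            hrepl, PySem.Chars.replace.go, if_neg hpre,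
            ih t.length (Nat.lt_succ_of_le htf) _ _ le_rfl]
          simp

theorem pvRepl_nil (old new : List Char) (ho : old ≠ []) :
    PySem.Chars.replace [] old new = [] := by
  simp [PySem.Chars.replace, PySem.Chars.replace.go, List.isEmpty_iff, ho]

theorem pvRepl_cons_neg (old new : List Char) (ho : old ≠ []) (c : Char) (t : List Char)
    (h : ¬ old.isPrefixOf (c :: t) = true) :
    PySem.Chars.replace (c :: t) old new = c :: PySem.Chars.replace t old new := by
  have h1 : PySem.Chars.replace (c :: t) old new
      = PySem.Chars.replace.go old new (t.length + 1) (c :: t) [] := by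
    simp [PySem.Chars.replace, List.isEmpty_iff, ho]
  rw [h1, PySem.Chars.replace.go, if_neg h, pvGo_spec old new ho t.length t [c] le_rfl]
  simp

theorem pvRepl_prefix (old new : List Char) (ho : old ≠ []) (s : List Char)
    (h : old.isPrefixOf s = true) :
    PySem.Chars.replace s old new = new ++ PySem.Chars.replace (s.drop old.length) old new := by
  cases s with
  | nil =>
    cases old with
    | nil => exact absurd rfl ho
    | cons a b => simp [List.isPrefixOf] at h
  | cons c t =>
    have h1 : PySem.Chars.replace (c :: t) old new
        = PySem.Chars.replace.go old new (t.length + 1) (c :: t) [] := by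
      simp [PySem.Chars.replace, List.isEmpty_iff, ho]
    have hol : 0 < old.length := by
      cases old with
      | nil => exact absurd rfl ho
      | cons a b => simp
    rw [h1, PySem.Chars.replace.go, if_pos h, List.append_nil,
      pvGo_spec old new ho t.length (List.drop old.length (c :: t)) new.reverse (by simp; omega)]
    simp

theorem pvRepl_prefix' (old new : List Char) (ho : old ≠ []) (b : List Char) :
    PySem.Chars.replace (old ++ b) old new = new ++ PySem.Chars.replace b old new := by
  rw [pvRepl_prefix old new ho _ (List.isPrefixOf_iff_prefix.mpr ⟨b, rfl⟩), List.drop_left]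

-- replace commutes with an appended block that cannot start a match
theorem pvRepl_append (old new : List Char) (ho : old ≠ []) (a b : List Char)
    (hx : ∀ x ∈ a, old.head? ≠ some x) :
    PySem.Chars.replace (a ++ b) old new = a ++ PySem.Chars.replace b old new := by
  induction a with
  | nil => simp
  | cons x a' ih =>
    have hnp : ¬ old.isPrefixOf (x :: (a' ++ b)) = true := by
      cases old with
      | nil => exact absurd rfl ho
      | cons o0 o' =>
        have : (o0 : Char) ≠ x := by
          intro hc; exact hx x (by simp) (by simp [hc])
        simp [List.isPrefixOf, this]
    rw [List.cons_append, pvRepl_cons_neg old new ho x (a' ++ b) hnp,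
      ih (fun y hy => hx y (by simp [hy]))]
    simp

-- a pattern p that avoids new's first character is never created by replace
theorem pvNo_create (old new p : List Char) (ho : old ≠ []) (h0 : Char)
    (hh : new.head? = some h0) (hp : h0 ∉ p) :
    ∀ s : List Char, p <+: PySem.Chars.replace s old new → p <+: s := by
  intro s
  induction s generalizing p with
  | nil =>
    intro hps
    rw [pvRepl_nil old new ho] at hps
    simpa using hps
  | cons c t ih =>
    intro hps
    by_cases hpre : old.isPrefixOf (c :: t) = true
    · rw [pvRepl_prefix old new ho _ hpre] at hps
      cases p with
      | nil => exact List.nil_prefix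
      | cons q p' =>
        exfalso
        cases new with
        | nil => simp at hh
        | cons m0 m' =>
          rcases List.cons_prefix_cons.mp hps with ⟨hq, -⟩
          simp at hh
          exact hp (by simp [hq, hh])
    · rw [pvRepl_cons_neg old new ho c t hpre] at hps
      cases p with
      | nil => exact List.nil_prefix
      | cons q p' =>
        rcases List.cons_prefix_cons.mp hps with ⟨rfl, hp'⟩
        have := ih (p := p') (fun hm => hp (by simp [hm])) hp'
        exact List.cons_prefix_cons.mpr ⟨rfl, this⟩

theorem pvNo_create_cons (old new p : List Char) (ho : old ≠ []) (h0 : Char)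
    (hh : new.head? = some h0) (hp : h0 ∉ p) (c : Char) (t : List Char) :
    p <+: (c :: PySem.Chars.replace t old new) → p <+: (c :: t) := by
  intro hps
  cases p with
  | nil => exact List.nil_prefix
  | cons q p' =>
    rcases List.cons_prefix_cons.mp hps with ⟨rfl, hp'⟩
    exact List.cons_prefix_cons.mpr
      ⟨rfl, pvNo_create old new p' ho h0 hh (fun hm => hp (by simp [hm])) t hp'⟩

-- the five passes of A, on character lists
def pvA5 (s : List Char) : List Char :=
  PySem.Chars.replace
    (PySem.Chars.replace
      (PySem.Chars.replace
        (PySem.Chars.replace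
          (PySem.Chars.replace s "Hi...".toList "History".toList)
          "Lite...".toList "Literature".toList)
        "International Rel...".toList "International Relations".toList)
      "Science Fiction R...".toList "Science Fiction Romance".toList)
    "Complementary Med...".toList "Complementary Medicine".toList

theorem pvScan_some (c : Char) (t old nw : List Char)
    (hf : pvFixes.find? (fun p => p.1.isPrefixOf (c :: t)) = some (old, nw)) :
    pvScan (c :: t) = nw ++ pvScan (List.drop old.length (c :: t)) := by
  rw [pvScan]
  rw [hf]

theorem pvScan_none (c : Char) (t : List Char)
    (hf : pvFixes.find? (fun p => p.1.isPrefixOf (c :: t)) = none) :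
    pvScan (c :: t) = c :: pvScan t := by
  rw [pvScan]
  rw [hf]

theorem pvA5_nil : pvA5 [] = [] := by
  unfold pvA5
  rw [pvRepl_nil "Hi...".toList "History".toList (by simp)]
  rw [pvRepl_nil "Lite...".toList "Literature".toList (by simp)]
  rw [pvRepl_nil "International Rel...".toList "International Relations".toList (by simp)]
  rw [pvRepl_nil "Science Fiction R...".toList "Science Fiction Romance".toList (by simp)]
  rw [pvRepl_nil "Complementary Med...".toList "Complementary Medicine".toList (by simp)]

theorem pvA5_k1 (rest : List Char) : pvA5 ("Hi...".toList ++ rest) = "History".toList ++ pvA5 rest := by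
  unfold pvA5
  rw [pvRepl_prefix' "Hi...".toList "History".toList (by simp)]
  rw [pvRepl_append "Lite...".toList "Literature".toList (by simp) "History".toList _ (by simp)]
  rw [pvRepl_append "International Rel...".toList "International Relations".toList (by simp) "History".toList _ (by simp)]
  rw [pvRepl_append "Science Fiction R...".toList "Science Fiction Romance".toList (by simp) "History".toList _ (by simp)]
  rw [pvRepl_append "Complementary Med...".toList "Complementary Medicine".toList (by simp) "History".toList _ (by simp)]

theorem pvA5_k2 (rest : List Char) : pvA5 ("Lite...".toList ++ rest) = "Literature".toList ++ pvA5 rest := by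
  unfold pvA5
  rw [pvRepl_append "Hi...".toList "History".toList (by simp) "Lite...".toList _ (by simp)]
  rw [pvRepl_prefix' "Lite...".toList "Literature".toList (by simp)]
  rw [pvRepl_append "International Rel...".toList "International Relations".toList (by simp) "Literature".toList _ (by simp)]
  rw [pvRepl_append "Science Fiction R...".toList "Science Fiction Romance".toList (by simp) "Literature".toList _ (by simp)]
  rw [pvRepl_append "Complementary Med...".toList "Complementary Medicine".toList (by simp) "Literature".toList _ (by simp)]

theorem pvA5_k3 (rest : List Char) : pvA5 ("International Rel...".toList ++ rest) = "International Relations".toList ++ pvA5 rest := by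
  unfold pvA5
  rw [pvRepl_append "Hi...".toList "History".toList (by simp) "International Rel...".toList _ (by simp)]
  rw [pvRepl_append "Lite...".toList "Literature".toList (by simp) "International Rel...".toList _ (by simp)]
  rw [pvRepl_prefix' "International Rel...".toList "International Relations".toList (by simp)]
  rw [pvRepl_append "Science Fiction R...".toList "Science Fiction Romance".toList (by simp) "International Relations".toList _ (by simp)]
  rw [pvRepl_append "Complementary Med...".toList "Complementary Medicine".toList (by simp) "International Relations".toList _ (by simp)]

theorem pvA5_k4 (rest : List Char) : pvA5 ("Science Fiction R...".toList ++ rest) = "Science Fiction Romance".toList ++ pvA5 rest := by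
  unfold pvA5
  rw [pvRepl_append "Hi...".toList "History".toList (by simp) "Science Fiction R...".toList _ (by simp)]
  rw [pvRepl_append "Lite...".toList "Literature".toList (by simp) "Science Fiction R...".toList _ (by simp)]
  rw [pvRepl_append "International Rel...".toList "International Relations".toList (by simp) "Science Fiction R...".toList _ (by simp)]
  rw [pvRepl_prefix' "Science Fiction R...".toList "Science Fiction Romance".toList (by simp)]
  rw [pvRepl_append "Complementary Med...".toList "Complementary Medicine".toList (by simp) "Science Fiction Romance".toList _ (by simp)]

theorem pvA5_k5 (rest : List Char) : pvA5 ("Complementary Med...".toList ++ rest) = "Complementary Medicine".toList ++ pvA5 rest := by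
  unfold pvA5
  rw [pvRepl_append "Hi...".toList "History".toList (by simp) "Complementary Med...".toList _ (by simp)]
  rw [pvRepl_append "Lite...".toList "Literature".toList (by simp) "Complementary Med...".toList _ (by simp)]
  rw [pvRepl_append "International Rel...".toList "International Relations".toList (by simp) "Complementary Med...".toList _ (by simp)]
  rw [pvRepl_append "Science Fiction R...".toList "Science Fiction Romance".toList (by simp) "Complementary Med...".toList _ (by simp)]
  rw [pvRepl_prefix' "Complementary Med...".toList "Complementary Medicine".toList (by simp)]

theorem pvA5_cons (c : Char) (t : List Char)
    (h1 : ¬ ("Hi...".toList).isPrefixOf (c :: t) = true)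
    (h2 : ¬ ("Lite...".toList).isPrefixOf (c :: t) = true)
    (h3 : ¬ ("International Rel...".toList).isPrefixOf (c :: t) = true)
    (h4 : ¬ ("Science Fiction R...".toList).isPrefixOf (c :: t) = true)
    (h5 : ¬ ("Complementary Med...".toList).isPrefixOf (c :: t) = true)
    : pvA5 (c :: t) = c :: pvA5 t := by
  unfold pvA5
  rw [pvRepl_cons_neg "Hi...".toList "History".toList (by simp) c t h1]
  have h2' : ¬ ("Lite...".toList).isPrefixOf (c ::
      PySem.Chars.replace (t) "Hi...".toList "History".toList) = true := by
    intro hc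
    apply h2
    apply List.isPrefixOf_iff_prefix.mpr
    exact pvNo_create_cons "Hi...".toList "History".toList ("Lite...".toList) (by simp) 'H' (by simp) (by simp) c _ (List.isPrefixOf_iff_prefix.mp hc)
  rw [pvRepl_cons_neg "Lite...".toList "Literature".toList (by simp) c _ h2']
  have h3' : ¬ ("International Rel...".toList).isPrefixOf (c ::
      PySem.Chars.replace (PySem.Chars.replace (t) "Hi...".toList "History".toList) "Lite...".toList "Literature".toList) = true := by
    intro hc
    apply h3
    apply List.isPrefixOf_iff_prefix.mpr
    exact pvNo_create_cons "Hi...".toList "History".toList ("International Rel...".toList) (by simp) 'H' (by simp) (by simp) c _ (pvNo_create_cons "Lite...".toList "Literature".toList ("International Rel...".toList) (by simp) 'L' (by simp) (by simp) c _ (List.isPrefixOf_iff_prefix.mp hc))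
  rw [pvRepl_cons_neg "International Rel...".toList "International Relations".toList (by simp) c _ h3']
  have h4' : ¬ ("Science Fiction R...".toList).isPrefixOf (c ::
      PySem.Chars.replace (PySem.Chars.replace (PySem.Chars.replace (t) "Hi...".toList "History".toList) "Lite...".toList "Literature".toList) "International Rel...".toList "International Relations".toList) = true := by
    intro hc
    apply h4
    apply List.isPrefixOf_iff_prefix.mpr
    exact pvNo_create_cons "Hi...".toList "History".toList ("Science Fiction R...".toList) (by simp) 'H' (by simp) (by simp) c _ (pvNo_create_cons "Lite...".toList "Literature".toList ("Science Fiction R...".toList) (by simp) 'L' (by simp) (by simp) c _ (pvNo_create_cons "International Rel...".toList "International Relations".toList ("Science Fiction R...".toList) (by simp) 'I' (by simp) (by simp) c _ (List.isPrefixOf_iff_prefix.mp hc)))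
  rw [pvRepl_cons_neg "Science Fiction R...".toList "Science Fiction Romance".toList (by simp) c _ h4']
  have h5' : ¬ ("Complementary Med...".toList).isPrefixOf (c ::
      PySem.Chars.replace (PySem.Chars.replace (PySem.Chars.replace (PySem.Chars.replace (t) "Hi...".toList "History".toList) "Lite...".toList "Literature".toList) "International Rel...".toList "International Relations".toList) "Science Fiction R...".toList "Science Fiction Romance".toList) = true := by
    intro hc
    apply h5
    apply List.isPrefixOf_iff_prefix.mpr
    exact pvNo_create_cons "Hi...".toList "History".toList ("Complementary Med...".toList) (by simp) 'H' (by simp) (by simp) c _ (pvNo_create_cons "Lite...".toList "Literature".toList ("Complementary Med...".toList) (by simp) 'L' (by simp) (by simp) c _ (pvNo_create_cons "International Rel...".toList "International Relations".toList ("Complementary Med...".toList) (by simp) 'I' (by simp) (by simp) c _ (pvNo_create_cons "Science Fiction R...".toList "Science Fiction Romance".toList ("Complementary Med...".toList) (by simp) 'S' (by simp) (by simp) c _ (List.isPrefixOf_iff_prefix.mp hc))))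
  rw [pvRepl_cons_neg "Complementary Med...".toList "Complementary Medicine".toList (by simp) c _ h5']

theorem pvMain : ∀ (n : Nat) (s : List Char), s.length ≤ n → pvScan s = pvA5 s := by
  intro n
  induction n with
  | zero =>
    intro s hs
    have hnil : s = [] := List.eq_nil_of_length_eq_zero (Nat.le_zero.mp hs)
    subst hnil
    rw [pvScan, pvA5_nil]
  | succ n ih =>
    intro s hs
    cases s with
    | nil => rw [pvScan, pvA5_nil]
    | cons c t =>
      by_cases h1 : ("Hi...".toList).isPrefixOf (c :: t) = true
      · obtain ⟨rest, hrw⟩ := List.isPrefixOf_iff_prefix.mp h1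
        have hf : pvFixes.find? (fun p => p.1.isPrefixOf (c :: t)) = some ("Hi...".toList, "History".toList) := by
          unfold pvFixes
          rw [List.find?_cons_of_pos (by simpa using h1)]
        rw [pvScan_some c t _ _ hf, ← hrw, List.drop_left, pvA5_k1]
        have hlen : rest.length ≤ n := by
          have hlc := congrArg List.length hrw
          simp at hlc hs
          omega
        rw [ih rest hlen]
      ·
        by_cases h2 : ("Lite...".toList).isPrefixOf (c :: t) = true
        · obtain ⟨rest, hrw⟩ := List.isPrefixOf_iff_prefix.mp h2
          have hf : pvFixes.find? (fun p => p.1.isPrefixOf (c :: t)) = some ("Lite...".toList, "Literature".toList) := by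
            unfold pvFixes
            rw [List.find?_cons_of_neg (by simpa using h1),
              List.find?_cons_of_pos (by simpa using h2)]
          rw [pvScan_some c t _ _ hf, ← hrw, List.drop_left, pvA5_k2]
          have hlen : rest.length ≤ n := by
            have hlc := congrArg List.length hrw
            simp at hlc hs
            omega
          rw [ih rest hlen]
        ·
          by_cases h3 : ("International Rel...".toList).isPrefixOf (c :: t) = true
          · obtain ⟨rest, hrw⟩ := List.isPrefixOf_iff_prefix.mp h3
            have hf : pvFixes.find? (fun p => p.1.isPrefixOf (c :: t)) = some ("International Rel...".toList, "International Relations".toList) := by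
              unfold pvFixes
              rw [List.find?_cons_of_neg (by simpa using h1),
                List.find?_cons_of_neg (by simpa using h2),
                List.find?_cons_of_pos (by simpa using h3)]
            rw [pvScan_some c t _ _ hf, ← hrw, List.drop_left, pvA5_k3]
            have hlen : rest.length ≤ n := by
              have hlc := congrArg List.length hrw
              simp at hlc hs
              omega
            rw [ih rest hlen]
          ·
            by_cases h4 : ("Science Fiction R...".toList).isPrefixOf (c :: t) = true
            · obtain ⟨rest, hrw⟩ := List.isPrefixOf_iff_prefix.mp h4
              have hf : pvFixes.find? (fun p => p.1.isPrefixOf (c :: t)) = some ("Science Fiction R...".toList, "Science Fiction Romance".toList) := by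
                unfold pvFixes
                rw [List.find?_cons_of_neg (by simpa using h1),
                  List.find?_cons_of_neg (by simpa using h2),
                  List.find?_cons_of_neg (by simpa using h3),
                  List.find?_cons_of_pos (by simpa using h4)]
              rw [pvScan_some c t _ _ hf, ← hrw, List.drop_left, pvA5_k4]
              have hlen : rest.length ≤ n := by
                have hlc := congrArg List.length hrw
                simp at hlc hs
                omega
              rw [ih rest hlen]
            ·
              by_cases h5 : ("Complementary Med...".toList).isPrefixOf (c :: t) = true
              · obtain ⟨rest, hrw⟩ := List.isPrefixOf_iff_prefix.mp h5
                have hf : pvFixes.find? (fun p => p.1.isPrefixOf (c :: t)) = some ("Complementary Med...".toList, "Complementary Medicine".toList) := by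
                  unfold pvFixes
                  rw [List.find?_cons_of_neg (by simpa using h1),
                    List.find?_cons_of_neg (by simpa using h2),
                    List.find?_cons_of_neg (by simpa using h3),
                    List.find?_cons_of_neg (by simpa using h4),
                    List.find?_cons_of_pos (by simpa using h5)]
                rw [pvScan_some c t _ _ hf, ← hrw, List.drop_left, pvA5_k5]
                have hlen : rest.length ≤ n := by
                  have hlc := congrArg List.length hrw
                  simp at hlc hs
                  omega
                rw [ih rest hlen]
              ·
                have hf : pvFixes.find? (fun p => p.1.isPrefixOf (c :: t)) = none := by
                  unfold pvFixes
                  rw [List.find?_cons_of_neg (by simpa using h1),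
                    List.find?_cons_of_neg (by simpa using h2),
                    List.find?_cons_of_neg (by simpa using h3),
                    List.find?_cons_of_neg (by simpa using h4),
                    List.find?_cons_of_neg (by simpa using h5),
                    List.find?_nil]
                rw [pvScan_none c t hf, pvA5_cons c t h1 h2 h3 h4 h5]
                have hlen : t.length ≤ n := by simp at hs; omega
                rw [ih t hlen]

-- ===== VERDICT (by name: the statement is the Claim_ definition above) =====
theorem fix_genre_spec : Claim_equal_fix_genre := by
  intro genre _
  unfold Spec_fix_genre fix_genre fix_genre_alt
  simp only [List.foldl]
  apply String.toList_inj.mp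
  simp [PySem.Str.replace]
  exact (pvMain genre.toList.length genre.toList le_rfl).symm ▸ rfl
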